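-- pv_equiv track=rewrite | github.com/brigitteunger/katas | test_car_pooling.py | create_passenger_dict
-- ===== SOURCE A (Python) =====
-- from typing import List, Dict, Tuple
--
-- def create_passenger_dict(
--                           trips: List[List[int]],
--                           pick_drop: int) -> Dict[int, int]:
--     # pick_drop: 1: pick up dict, 2: drop off dict
--     pick_up_dict = {}
--     max_stop = 0
--     min_stop = trips[0][pick_drop]
--     for trip in trips:
--         if trip[pick_drop] not in pick_up_dict:
--             pick_up_dict[trip[pick_drop]] = trip[0]
--             min_stop = min(min_stop, trip[pick_drop])
--             max_stop = max(max_stop, trip[pick_drop])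
--         else:
--             pick_up_dict[trip[pick_drop]] += trip[0]
--     return pick_up_dict, min_stop, max_stop
-- ===== SOURCE B (Python) =====
-- def create_passenger_dict(trips, pick_drop):
--     # pick_drop: 1: pick up dict, 2: drop off dict
--     stops = list(dict.fromkeys(trip[pick_drop] for trip in trips))
--     totals = {s: sum(t[0] for t in trips if t[pick_drop] == s) for s in stops}
--     return totals, min(stops), max(stops)
-- ===== Notes on version B (the rewrite author's own statement) =====
-- stated objective: alternative
-- what changed: B replaces A's single accumulating pass (dict plus inline running min/max behind a membership branch) by staged whole-list reductions: dedup the stop column once for the key order, compute each key's total by its own sum over the trips, and take min/max of the stop list; Pre_ excludes empty trips and out-of-range pick_drop, where A raises IndexError.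
-- intended difference: On inputs where every trip's stop at pick_drop is negative, A returns max_stop = 0 (its accumulator seed) while B returns the actual largest stop, which is the intended maximum. — e.g. on create_passenger_dict([[3, -2]], 1): A returns ([(-2, 3)], -2, 0), B returns ([(-2, 3)], -2, -2)
import Mathlib
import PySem

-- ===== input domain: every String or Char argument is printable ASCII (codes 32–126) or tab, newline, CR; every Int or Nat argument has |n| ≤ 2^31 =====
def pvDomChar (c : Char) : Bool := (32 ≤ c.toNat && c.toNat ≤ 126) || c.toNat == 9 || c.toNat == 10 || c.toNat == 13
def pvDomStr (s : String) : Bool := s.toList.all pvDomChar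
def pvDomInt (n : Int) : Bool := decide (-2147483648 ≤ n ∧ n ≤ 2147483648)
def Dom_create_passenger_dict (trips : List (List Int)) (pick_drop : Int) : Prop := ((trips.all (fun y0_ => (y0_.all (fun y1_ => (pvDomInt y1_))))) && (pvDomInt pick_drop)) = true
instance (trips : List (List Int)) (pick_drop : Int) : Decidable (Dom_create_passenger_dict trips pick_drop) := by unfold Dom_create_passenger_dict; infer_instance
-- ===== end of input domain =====

-- B builds the result by staged whole-list reductions (dedup of the stop column, one sum per
-- stop, min/max over the stops) instead of A's single accumulating pass; where all stops are
-- negative B returns the true maximum where A returns its 0 seed (stated in D_ below).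

-- ===== PORT A =====
-- one loop step of A: (dict, min_stop, max_stop) updated per trip
def pvAStep (pick_drop : Int) (st : PySem.Dict Int Int × Int × Int) (trip : List Int) :
    PySem.Dict Int Int × Int × Int :=
  let s := PySem.List.pyGetD trip pick_drop 0
  let a := PySem.List.pyGetD trip 0 0
  if st.1.contains s then (st.1.insert s (st.1.getD s 0 + a), st.2.1, st.2.2)
  else (st.1.insert s a, min st.2.1 s, max st.2.2 s)

def create_passenger_dict (trips : List (List Int)) (pick_drop : Int) :
    (List (Int × Int)) × Int × Int :=
  (trips.foldl (pvAStep pick_drop)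
    (PySem.Dict.empty, PySem.List.pyGetD (PySem.List.pyGetD trips 0 []) pick_drop 0, 0))
    |> fun r => (r.1.items, r.2.1, r.2.2)

-- ===== PORT B =====
-- stops = list(dict.fromkeys(...)); totals = {s: sum(...) for s in stops}; min(stops); max(stops)
def create_passenger_dict_alt (trips : List (List Int)) (pick_drop : Int) :
    (List (Int × Int)) × Int × Int :=
  let stops := PySem.List.dedup (trips.map (fun trip => PySem.List.pyGetD trip pick_drop 0))
  (stops.map (fun s =>
      (s, ((trips.filter (fun t => PySem.List.pyGetD t pick_drop 0 == s)).map
            (fun t => PySem.List.pyGetD t 0 0)).sum)),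
   (PySem.List.min? stops (fun x => x)).getD 0,
   (PySem.List.max? stops (fun x => x)).getD 0)

-- ===== PRECONDITION & SPEC =====
-- A raises IndexError on empty trips (trips[0]) and whenever pick_drop is out of range for some trip.
def Pre_create_passenger_dict (trips : List (List Int)) (pick_drop : Int) : Prop :=
  trips ≠ [] ∧ ∀ trip ∈ trips, PySem.Raise.InRange trip.length pick_drop
instance (trips : List (List Int)) (pick_drop : Int) : Decidable (Pre_create_passenger_dict trips pick_drop) := by unfold Pre_create_passenger_dict; infer_instance

def pvWitness_create_passenger_dict : List (List Int) × Int := ([[2, 1, 5], [3, 3, 7], [1, 1, 4]], 1)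

-- On inputs where every trip's stop at pick_drop is negative, A returns max_stop = 0 (its
-- accumulator seed) while B returns the actual largest stop, which is the intended maximum.
def D_create_passenger_dict (trips : List (List Int)) (pick_drop : Int) : Prop :=
  trips ≠ [] ∧ ∀ trip ∈ trips, PySem.List.pyGetD trip pick_drop 0 < 0
instance (trips : List (List Int)) (pick_drop : Int) : Decidable (D_create_passenger_dict trips pick_drop) := by unfold D_create_passenger_dict; infer_instance

def Spec_create_passenger_dict (trips : List (List Int)) (pick_drop : Int) (out : (List (Int × Int)) × Int × Int) : Prop := ¬ D_create_passenger_dict trips pick_drop → out = create_passenger_dict_alt trips pick_drop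
instance (trips : List (List Int)) (pick_drop : Int) (out : (List (Int × Int)) × Int × Int) : Decidable (Spec_create_passenger_dict trips pick_drop out) := by unfold Spec_create_passenger_dict; infer_instance

def pvDiffWitness_create_passenger_dict : List (List Int) × Int := ([[3, -2]], 1)
def pvDiffWitnessOut_create_passenger_dict : ((List (Int × Int)) × Int × Int) × ((List (Int × Int)) × Int × Int) :=
  (([(-2, 3)], -2, 0), ([(-2, 3)], -2, -2))

-- ===== CLAIM (what is proved, stated in full; the proofs are below) =====
def Claim_unchanged_create_passenger_dict : Prop := ∀ (trips : List (List Int)) (pick_drop : Int), Dom_create_passenger_dict trips pick_drop → Pre_create_passenger_dict trips pick_drop → Spec_create_passenger_dict trips pick_drop (create_passenger_dict trips pick_drop)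
def Claim_changed_create_passenger_dict : Prop := Dom_create_passenger_dict (pvDiffWitness_create_passenger_dict.1) (pvDiffWitness_create_passenger_dict.2) ∧ Pre_create_passenger_dict (pvDiffWitness_create_passenger_dict.1) (pvDiffWitness_create_passenger_dict.2) ∧ D_create_passenger_dict (pvDiffWitness_create_passenger_dict.1) (pvDiffWitness_create_passenger_dict.2) ∧ create_passenger_dict (pvDiffWitness_create_passenger_dict.1) (pvDiffWitness_create_passenger_dict.2) = pvDiffWitnessOut_create_passenger_dict.1 ∧ create_passenger_dict_alt (pvDiffWitness_create_passenger_dict.1) (pvDiffWitness_create_passenger_dict.2) = pvDiffWitnessOut_create_passenger_dict.2 ∧ pvDiffWitnessOut_create_passenger_dict.1 ≠ pvDiffWitnessOut_create_passenger_dict.2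
def Claim_exact_create_passenger_dict : Prop := ∀ (trips : List (List Int)) (pick_drop : Int), Dom_create_passenger_dict trips pick_drop → Pre_create_passenger_dict trips pick_drop → D_create_passenger_dict trips pick_drop → create_passenger_dict trips pick_drop ≠ create_passenger_dict_alt trips pick_drop

-- ===== LEMMAS AND PROOFS =====

-- abbreviations for the two columns both programs read
def pvStop (pd : Int) (t : List Int) : Int := PySem.List.pyGetD t pd 0
def pvAmt (t : List Int) : Int := PySem.List.pyGetD t 0 0
def pvStops (pd : Int) (l : List (List Int)) : List Int := PySem.List.dedup (l.map (pvStop pd))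
def pvSum (pd : Int) (l : List (List Int)) (s : Int) : Int :=
  ((l.filter (fun t => pvStop pd t == s)).map pvAmt).sum

lemma stops_append (pd : Int) (l : List (List Int)) (t : List Int) :
    pvStops pd (l ++ [t]) =
      if pvStop pd t ∈ pvStops pd l then pvStops pd l else pvStops pd l ++ [pvStop pd t] := by
  simp only [pvStops, PySem.List.dedup, PySem.Set.ofList, List.map_append, List.map_cons,
    List.map_nil, List.foldl_append, List.foldl_cons, List.foldl_nil, PySem.Set.add]
  split_ifs with h1 h2 h2 <;> first | rfl | (exfalso; revert h1 h2; simp)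

lemma sum_append (pd : Int) (l : List (List Int)) (t : List Int) (s : Int) :
    pvSum pd (l ++ [t]) s = pvSum pd l s + (if pvStop pd t = s then pvAmt t else 0) := by
  simp only [pvSum, List.filter_append, List.filter_cons, List.filter_nil, List.map_append,
    List.sum_append, beq_iff_eq]
  split_ifs <;> simp

lemma sum_of_not_mem (pd : Int) (l : List (List Int)) (s : Int) (h : s ∉ pvStops pd l) :
    pvSum pd l s = 0 := by
  have h' : s ∉ l.map (pvStop pd) := fun hm => h (by simpa [pvStops, PySem.List.mem_dedup] using hm)
  have : l.filter (fun t => pvStop pd t == s) = [] := by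
    rw [List.filter_eq_nil_iff]
    intro a ha hc
    exact h' (List.mem_map.mpr ⟨a, ha, by simpa using hc⟩)
  simp [pvSum, this]

lemma nodup_stops (pd : Int) (l : List (List Int)) : (pvStops pd l).Nodup :=
  PySem.List.nodup_dedup _

lemma stops_cons (pd : Int) (t : List Int) (rest : List (List Int)) :
    ∃ tail, pvStops pd (t :: rest) = pvStop pd t :: tail := by
  have key : ∀ (xs : List Int) (acc : List Int), ∃ ex, xs.foldl PySem.Set.add acc = acc ++ ex := by
    intro xs
    induction xs with
    | nil => exact fun acc => ⟨[], by simp⟩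
    | cons x xt ih =>
      intro acc
      simp only [List.foldl_cons, PySem.Set.add]
      by_cases h : x ∈ acc
      · simpa [h] using ih acc
      · obtain ⟨ex, hex⟩ := ih (acc ++ [x])
        exact ⟨x :: ex, by rw [if_neg (by simpa [PySem.Set.contains] using h), hex]; simp⟩
  obtain ⟨ex, hex⟩ := key (rest.map (pvStop pd)) [pvStop pd t]
  refine ⟨ex, ?_⟩
  simp only [pvStops, PySem.List.dedup, PySem.Set.ofList, List.map_cons, List.foldl_cons]
  rw [show PySem.Set.add PySem.Set.empty (pvStop pd t) = [pvStop pd t] by rfl, hex]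
  rfl


lemma afold (pd : Int) (m0 : Int) (l : List (List Int)) :
    l.foldl (pvAStep pd) (PySem.Dict.empty, m0, 0) =
      (PySem.Dict.mk ((pvStops pd l).map (fun s => (s, pvSum pd l s))),
       (pvStops pd l).foldl min m0,
       (pvStops pd l).foldl max 0) := by
  induction l using List.reverseRecOn with
  | nil => rfl
  | append_singleton l t ih =>
    rw [List.foldl_append, List.foldl_cons, List.foldl_nil, ih]
    have hsa := stops_append pd l t
    have hnd := nodup_stops pd l
    simp only [pvStop] at hsa
    have hkeys : (PySem.Dict.mk ((pvStops pd l).map (fun s => (s, pvSum pd l s)))).keys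
        = pvStops pd l := by
      simp only [PySem.Dict.keys, List.map_map]
      exact List.map_id _
    by_cases hmem : PySem.List.pyGetD t pd 0 ∈ pvStops pd l
    · have hcont : (PySem.Dict.mk ((pvStops pd l).map (fun s => (s, pvSum pd l s)))).contains
          (PySem.List.pyGetD t pd 0) = true := by
        rw [PySem.Dict.contains_eq_decide_mem_keys, hkeys]; simpa using hmem
      have hgetD : (PySem.Dict.mk ((pvStops pd l).map (fun s => (s, pvSum pd l s)))).getD
          (PySem.List.pyGetD t pd 0) 0 = pvSum pd l (PySem.List.pyGetD t pd 0) := by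
        apply PySem.Dict.getD_of_mem_items
        · exact List.mem_map.mpr ⟨PySem.List.pyGetD t pd 0, hmem, rfl⟩
        · rw [hkeys]; exact hnd
      simp only [pvAStep]
      rw [if_pos hcont, hsa, if_pos hmem]
      refine Prod.ext ?_ rfl
      apply PySem.Dict.ext
      rw [PySem.Dict.items_insert_of_contains _ _ hcont]
      simp only [List.map_map]
      apply List.map_congr_left
      intro s' hs'
      have hsum := sum_append pd l t s'
      simp only [pvStop, pvAmt] at hsum
      simp only [Function.comp_apply, hsum]
      by_cases he : s' = PySem.List.pyGetD t pd 0
      · subst he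
        simp [hgetD]
      · have hne : ¬ ((s', pvSum pd l s').1 == PySem.List.pyGetD t pd 0) = true := by simpa using he
        rw [if_neg hne, if_neg (fun hh => he hh.symm)]
        simp
    · have hcont : (PySem.Dict.mk ((pvStops pd l).map (fun s => (s, pvSum pd l s)))).contains
          (PySem.List.pyGetD t pd 0) = false := by
        rw [PySem.Dict.contains_eq_decide_mem_keys, hkeys]; simpa using hmem
      simp only [pvAStep]
      rw [if_neg (by simp [hcont]), hsa, if_neg hmem]
      refine Prod.ext ?_ (Prod.ext ?_ ?_)
      · apply PySem.Dict.ext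
        rw [PySem.Dict.items_insert_of_not_contains _ _ hcont]
        simp only [List.map_append, List.map_cons, List.map_nil]
        congr 1
        · apply List.map_congr_left
          intro s' hs'
          have hsum := sum_append pd l t s'
          simp only [pvStop, pvAmt] at hsum
          rw [hsum, if_neg (by intro hh; exact hmem (hh ▸ hs')), add_zero]
        · have hsum := sum_append pd l t (PySem.List.pyGetD t pd 0)
          simp only [pvStop, pvAmt] at hsum
          rw [hsum, sum_of_not_mem pd l _ hmem]
          simp
      · simp [List.foldl_append]
      · simp [List.foldl_append]

lemma mem_stops_of_mem (pd : Int) (trips : List (List Int)) (tr : List Int) (h : tr ∈ trips) :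
    PySem.List.pyGetD tr pd 0 ∈ pvStops pd trips := by
  rw [pvStops, PySem.List.mem_dedup]
  exact List.mem_map.mpr ⟨tr, h, rfl⟩

lemma mem_trips_of_mem_stops (pd : Int) (trips : List (List Int)) (s : Int)
    (h : s ∈ pvStops pd trips) : ∃ tr ∈ trips, PySem.List.pyGetD tr pd 0 = s := by
  rw [pvStops, PySem.List.mem_dedup] at h
  simpa [pvStop] using List.mem_map.mp h

lemma foldl_max_init (l : List Int) : ∀ a b : Int, l.foldl max (max a b) = max (l.foldl max a) b := by
  induction l with
  | nil => intro a b; rfl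
  | cons c tl ih =>
    intro a b
    simp only [List.foldl_cons]
    rw [show max (max a b) c = max (max a c) b by
      rw [max_assoc, max_comm b c, ← max_assoc], ih]

-- ===== VERDICT (by name: the statement is the Claim_ definition above) =====
theorem create_passenger_dict_spec : Claim_unchanged_create_passenger_dict := by
  intro trips pd _hdom hpre
  unfold Spec_create_passenger_dict
  intro hnD
  unfold Pre_create_passenger_dict at hpre
  unfold D_create_passenger_dict at hnD
  obtain ⟨hne, -⟩ := hpre
  obtain ⟨t, rest, rfl⟩ := List.exists_cons_of_ne_nil hne
  obtain ⟨tr, htr, htr0⟩ : ∃ tr ∈ t :: rest, 0 ≤ PySem.List.pyGetD tr pd 0 := by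
    by_contra hc
    push_neg at hc
    exact hnD ⟨hne, fun trip h => hc trip h⟩
  unfold create_passenger_dict create_passenger_dict_alt
  rw [show PySem.List.pyGetD (PySem.List.pyGetD (t :: rest) 0 []) pd 0
      = pvStop pd t by simp [PySem.List.pyGetD_zero_cons, pvStop]]
  rw [afold pd (pvStop pd t) (t :: rest)]
  rw [show (fun trip => PySem.List.pyGetD trip pd 0) = pvStop pd from rfl,
    show PySem.List.dedup ((t :: rest).map (pvStop pd)) = pvStops pd (t :: rest) from rfl]
  obtain ⟨tail, htail⟩ := stops_cons pd t rest
  have hMmem := mem_stops_of_mem pd (t :: rest) tr htr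
  rw [htail] at hMmem ⊢
  have hle := PySem.List.le_foldl_max tail (pvStop pd t)
  have hM : (0 : Int) ≤ tail.foldl max (pvStop pd t) := by
    rcases List.mem_cons.mp hMmem with h | h
    · exact le_trans (h ▸ htr0) hle.1
    · exact le_trans htr0 (hle.2 _ h)
  refine Prod.ext ?_ (Prod.ext ?_ ?_)
  · rfl
  · show (pvStop pd t :: tail).foldl min (pvStop pd t)
        = (PySem.List.min? (pvStop pd t :: tail) (fun x => x)).getD 0
    rw [PySem.List.min?_id_cons, List.foldl_cons, min_self, Option.getD_some]
  · show (pvStop pd t :: tail).foldl max 0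
        = (PySem.List.max? (pvStop pd t :: tail) (fun x => x)).getD 0
    rw [PySem.List.max?_id_cons, List.foldl_cons, Option.getD_some,
      max_comm (0 : Int) (pvStop pd t), foldl_max_init]
    exact max_eq_left hM

theorem create_passenger_dict_changed : Claim_changed_create_passenger_dict := by
  unfold Claim_changed_create_passenger_dict; decide

theorem create_passenger_dict_tight : Claim_exact_create_passenger_dict := by
  intro trips pd _hdom hpre hD
  unfold Pre_create_passenger_dict at hpre
  unfold D_create_passenger_dict at hD
  intro heq
  obtain ⟨hne, hneg⟩ := hD
  obtain ⟨t, rest, rfl⟩ := List.exists_cons_of_ne_nil hne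
  have h22 := congrArg (fun r => r.2.2) heq
  unfold create_passenger_dict create_passenger_dict_alt at h22
  rw [show PySem.List.pyGetD (PySem.List.pyGetD (t :: rest) 0 []) pd 0
      = pvStop pd t by simp [PySem.List.pyGetD_zero_cons, pvStop]] at h22
  rw [afold pd (pvStop pd t) (t :: rest)] at h22
  rw [show (fun trip => PySem.List.pyGetD trip pd 0) = pvStop pd from rfl,
    show PySem.List.dedup ((t :: rest).map (pvStop pd)) = pvStops pd (t :: rest) from rfl] at h22
  obtain ⟨tail, htail⟩ := stops_cons pd t rest
  rw [htail] at h22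
  simp only [PySem.List.max?_id_cons, Option.getD_some, List.foldl_cons] at h22
  have hA : (0 : Int) ≤ tail.foldl max (max 0 (pvStop pd t)) :=
    le_trans (le_max_left _ _) (PySem.List.le_foldl_max tail _).1
  have hBmem : tail.foldl max (pvStop pd t) ∈ pvStops pd (t :: rest) := by
    rw [htail]
    rcases PySem.List.foldl_max_mem tail (pvStop pd t) with h | h
    · rw [h]; exact List.mem_cons_self
    · exact List.mem_cons_of_mem _ h
  obtain ⟨tr, htr, htrs⟩ := mem_trips_of_mem_stops pd (t :: rest) _ hBmem
  have := hneg tr htr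
  rw [htrs] at this
  omega
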